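-- pv_equiv track=rewrite | github.com/Snipyfly/impectPy | examples/match_overview.py | extract_team_logo
-- ===== SOURCE A (Python) =====
-- from typing import Dict, Iterable, List, Optional, Sequence, Tuple
--
-- def extract_team_logo(match_meta: Dict[str, object], side: str) -> Optional[str]:
--     """Return a logo URL or data URI for the requested team if available."""
--
--     side = side.lower()
--     candidates = []
--     for key, value in match_meta.items():
--         if not isinstance(value, str) or not value:
--             continue
--         lower_key = key.lower()
--         if "logo" not in lower_key:
--             continue
--         if side in lower_key or lower_key.startswith(side):
--             candidates.append(value)
--
--     if candidates:
--         # prefer https URLs over others, fallback to first entry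
--         https_candidates = [value for value in candidates if value.startswith("https://")]
--         return https_candidates[0] if https_candidates else candidates[0]
--     return None
-- ===== SOURCE B (Python) =====
-- def extract_team_logo(match_meta, side):
--     """Single pass: return the first https candidate immediately; otherwise
--     remember the first matching candidate as fallback."""
--     side = side.lower()
--     fallback = None
--     for key, value in match_meta.items():
--         if not isinstance(value, str) or not value:
--             continue
--         lower_key = key.lower()
--         if "logo" not in lower_key or side not in lower_key:
--             continue
--         if value.startswith("https://"):
--             return value
--         if fallback is None:
--             fallback = value
--     return fallback
-- ===== Notes on version B (the rewrite author's own statement) =====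
-- stated objective: simpler
-- what changed: Single pass over the items with an early return on the first https candidate and a first-match fallback variable, instead of building a candidate list and re-scanning it for https; the redundant startswith(side) disjunct (implied by 'side in lower_key') is dropped.
import Mathlib
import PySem

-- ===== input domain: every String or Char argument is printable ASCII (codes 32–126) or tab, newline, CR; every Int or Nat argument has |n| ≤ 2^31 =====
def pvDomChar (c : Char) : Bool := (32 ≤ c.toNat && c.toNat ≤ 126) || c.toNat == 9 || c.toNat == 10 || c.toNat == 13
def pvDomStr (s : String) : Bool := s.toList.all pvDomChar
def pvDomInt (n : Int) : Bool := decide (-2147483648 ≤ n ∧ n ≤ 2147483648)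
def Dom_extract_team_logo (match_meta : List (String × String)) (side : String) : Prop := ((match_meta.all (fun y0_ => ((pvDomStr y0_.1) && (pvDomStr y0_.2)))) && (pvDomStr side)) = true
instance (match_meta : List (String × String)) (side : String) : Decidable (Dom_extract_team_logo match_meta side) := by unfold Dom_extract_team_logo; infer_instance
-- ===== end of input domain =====

-- B: single pass with early return on the first https candidate and a first-match
-- fallback, instead of A's collected candidate list re-scanned for https (objective: simpler).


-- ===== PORT A =====
def extract_team_logo (match_meta : List (String × String)) (side : String) : Option String :=
  let side := PySem.Str.lower side
  let candidates := match_meta.foldl (fun acc kv =>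
    if kv.2 == "" then acc
    else
      let lower_key := PySem.Str.lower kv.1
      if !(PySem.Str.isIn "logo" lower_key) then acc
      else if PySem.Str.isIn side lower_key || PySem.Str.startswith lower_key side then
        acc ++ [kv.2]
      else acc) []
  match candidates with
  | [] => none
  | c :: _ =>
    match (candidates.filter (fun v => PySem.Str.startswith v "https://")).head? with
    | some v => some v
    | none => some c

-- ===== PORT B =====
def extractLogoLoop (side : String) (fb : Option String) : List (String × String) → Option String
  | [] => fb
  | kv :: rest =>
    if kv.2 == "" then extractLogoLoop side fb rest
    else
      let lower_key := PySem.Str.lower kv.1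
      if !(PySem.Str.isIn "logo" lower_key) || !(PySem.Str.isIn side lower_key) then
        extractLogoLoop side fb rest
      else if PySem.Str.startswith kv.2 "https://" then some kv.2
      else
        match fb with
        | none => extractLogoLoop side (some kv.2) rest
        | some _ => extractLogoLoop side fb rest

def extract_team_logo_alt (match_meta : List (String × String)) (side : String) : Option String :=
  extractLogoLoop (PySem.Str.lower side) none match_meta

-- ===== PRECONDITION & SPEC =====
def Spec_extract_team_logo (match_meta : List (String × String)) (side : String) (out : Option String) : Prop := out = extract_team_logo_alt match_meta side
instance (match_meta : List (String × String)) (side : String) (out : Option String) : Decidable (Spec_extract_team_logo match_meta side out) := by unfold Spec_extract_team_logo; infer_instance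

-- ===== CLAIM (what is proved, stated in full; the proofs are below) =====
def Claim_equal_extract_team_logo : Prop := ∀ (match_meta : List (String × String)) (side : String), Dom_extract_team_logo match_meta side → Spec_extract_team_logo match_meta side (extract_team_logo match_meta side)

-- ===== LEMMAS AND PROOFS =====

-- the common filter condition (with side already lowered)
def logoCond (s : String) (kv : String × String) : Bool :=
  !(kv.2 == "") && PySem.Str.isIn "logo" (PySem.Str.lower kv.1) && PySem.Str.isIn s (PySem.Str.lower kv.1)

def httpsB (v : String) : Bool := PySem.Str.startswith v "https://"

def candsOf (s : String) (ms : List (String × String)) : List String :=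
  (ms.filter (logoCond s)).map (fun kv => kv.2)

-- what B's loop computes, as a function of A's candidate list
def loopSpec (s : String) (ms : List (String × String)) (fb : Option String) : Option String :=
  match ((candsOf s ms).filter httpsB).head? with
  | some v => some v
  | none => fb.or (candsOf s ms).head?

lemma isIn_of_startswith (s lk : String) (h : PySem.Str.startswith lk s = true) :
    PySem.Str.isIn s lk = true := by
  simp only [PySem.Str.startswith_eq] at h
  simp only [PySem.Str.isIn_eq]
  exact (PySem.Chars.isIn_iff_infix _ _).mpr ((PySem.Chars.startswith_iff _ _).mp h).isInfix

-- A's disjunct 'startswith lk s' is absorbed by 'isIn s lk'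
lemma or_startswith_eq (s lk : String) :
    (PySem.Str.isIn s lk || PySem.Str.startswith lk s) = PySem.Str.isIn s lk := by
  cases h : PySem.Str.startswith lk s
  · rw [Bool.or_false]
  · rw [isIn_of_startswith s lk h, Bool.true_or]

lemma stepA_eq (s : String) (acc : List String) (kv : String × String) :
    (if kv.2 == "" then acc
     else if !(PySem.Str.isIn "logo" (PySem.Str.lower kv.1)) then acc
     else if PySem.Str.isIn s (PySem.Str.lower kv.1) ||
         PySem.Str.startswith (PySem.Str.lower kv.1) s then acc ++ [kv.2]
     else acc) = if logoCond s kv then acc ++ [kv.2] else acc := by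
  rw [or_startswith_eq]
  by_cases h1 : (kv.2 == "") = true
  · simp [logoCond, h1]
  · by_cases h2 : PySem.Chars.isIn ['l', 'o', 'g', 'o'] (PySem.Chars.lower kv.1.toList) = true
    · by_cases h3 : PySem.Chars.isIn s.toList (PySem.Chars.lower kv.1.toList) = true <;>
        simp [logoCond, h1, h2, h3]
    · simp [logoCond, h1, h2]

lemma candsOf_cons (s : String) (kv : String × String) (rest : List (String × String)) :
    candsOf s (kv :: rest) =
      if logoCond s kv then kv.2 :: candsOf s rest else candsOf s rest := by
  unfold candsOf
  by_cases hc : logoCond s kv = true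
  · rw [List.filter_cons_of_pos hc, List.map_cons, if_pos hc]
  · rw [List.filter_cons_of_neg (by simpa using hc), if_neg hc]

-- A's candidate fold builds exactly candsOf
lemma foldl_acc_eq_candsOf (s : String) (ms : List (String × String)) (acc : List String) :
    ms.foldl (fun acc kv =>
      if kv.2 == "" then acc
      else if !(PySem.Str.isIn "logo" (PySem.Str.lower kv.1)) then acc
      else if PySem.Str.isIn s (PySem.Str.lower kv.1) ||
          PySem.Str.startswith (PySem.Str.lower kv.1) s then acc ++ [kv.2]
      else acc) acc = acc ++ candsOf s ms := by
  induction ms generalizing acc with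
  | nil => simp [candsOf]
  | cons kv rest ih =>
    rw [List.foldl_cons, stepA_eq, candsOf_cons]
    by_cases hc : logoCond s kv = true
    · rw [if_pos hc, if_pos hc, ih, List.append_assoc, List.singleton_append]
    · rw [if_neg hc, if_neg hc, ih]

lemma foldl_eq_candsOf (s : String) (ms : List (String × String)) :
    ms.foldl (fun acc kv =>
      if kv.2 == "" then acc
      else if !(PySem.Str.isIn "logo" (PySem.Str.lower kv.1)) then acc
      else if PySem.Str.isIn s (PySem.Str.lower kv.1) ||
          PySem.Str.startswith (PySem.Str.lower kv.1) s then acc ++ [kv.2]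
      else acc) [] = candsOf s ms := by
  rw [foldl_acc_eq_candsOf, List.nil_append]

lemma loopSpec_cons_neg (s : String) (kv : String × String) (rest : List (String × String))
    (fb : Option String) (hc : logoCond s kv = false) :
    loopSpec s (kv :: rest) fb = loopSpec s rest fb := by
  unfold loopSpec
  rw [candsOf_cons, if_neg (by simp [hc])]

lemma loopSpec_cons_https (s : String) (kv : String × String) (rest : List (String × String))
    (fb : Option String) (hc : logoCond s kv = true) (h4 : httpsB kv.2 = true) :
    loopSpec s (kv :: rest) fb = some kv.2 := by
  unfold loopSpec
  rw [candsOf_cons, if_pos hc, List.filter_cons_of_pos h4, List.head?_cons]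

lemma loopSpec_cons_nonhttps (s : String) (kv : String × String) (rest : List (String × String))
    (fb : Option String) (hc : logoCond s kv = true) (h4 : httpsB kv.2 = false) :
    loopSpec s (kv :: rest) fb = loopSpec s rest (fb.or (some kv.2)) := by
  unfold loopSpec
  rw [candsOf_cons, if_pos hc, List.filter_cons_of_neg (by simp [h4]), List.head?_cons]
  cases hf : ((candsOf s rest).filter httpsB).head? with
  | some v => rfl
  | none => cases fb <;> rfl

-- B's loop invariant
lemma loop_eq_spec (s : String) (ms : List (String × String)) (fb : Option String) :
    extractLogoLoop s fb ms = loopSpec s ms fb := by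
  induction ms generalizing fb with
  | nil =>
    simp [extractLogoLoop, loopSpec, candsOf]
  | cons kv rest ih =>
    simp only [extractLogoLoop]
    by_cases h1 : (kv.2 == "") = true
    · rw [if_pos h1, ih, loopSpec_cons_neg _ _ _ _ (by simp [logoCond, h1])]
    · rw [if_neg h1]
      by_cases h2 : PySem.Chars.isIn ['l', 'o', 'g', 'o'] (PySem.Chars.lower kv.1.toList) = true
      · by_cases h3 : PySem.Chars.isIn s.toList (PySem.Chars.lower kv.1.toList) = true
        · have hc : logoCond s kv = true := by
            simp [logoCond, h2, h3]; simpa using h1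
          rw [if_neg (by simp [h2, h3])]
          by_cases h4 : PySem.Str.startswith kv.2 "https://" = true
          · rw [if_pos h4, loopSpec_cons_https _ _ _ _ hc (by simpa [httpsB] using h4)]
          · rw [if_neg h4, loopSpec_cons_nonhttps _ _ _ _ hc (by simpa [httpsB] using h4)]
            cases fb with
            | none => exact ih _
            | some x => exact ih _
        · rw [if_pos (by simp [h3]), ih,
            loopSpec_cons_neg _ _ _ _ (by simp [logoCond, h3])]
      · rw [if_pos (by simp [h2]), ih,
          loopSpec_cons_neg _ _ _ _ (by simp [logoCond, h2])]

-- ===== VERDICT (by name: the statement is the Claim_ definition above) =====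
theorem extract_team_logo_spec : Claim_equal_extract_team_logo := by
  intro mm side _
  unfold Spec_extract_team_logo extract_team_logo_alt extract_team_logo
  rw [loop_eq_spec]
  dsimp only
  rw [foldl_eq_candsOf]
  unfold loopSpec httpsB
  cases hcs : candsOf (PySem.Str.lower side) mm with
  | nil => rfl
  | cons c cs =>
    cases hh : ((c :: cs).filter (fun v => PySem.Str.startswith v "https://")).head? with
    | some v => rfl
    | none => rfl
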